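-- pv_equiv track=rewrite | github.com/d14405055-hsieh/2026-python | weeks/week-04/solutions/1114405055/question_10038_easy.py | is_jolly
-- ===== SOURCE A (Python) =====
-- def is_jolly(seq):
--     n = len(seq)
--     if n <= 1:
--         return True
--
--     seen = set()
--     for i in range(n - 1):
--         d = abs(seq[i] - seq[i + 1])
--         if 1 <= d <= n - 1:
--             seen.add(d)
--
--     return len(seen) == n - 1
-- ===== SOURCE B (Python) =====
-- def is_jolly(seq):
--     diffs = sorted(abs(a - b) for a, b in zip(seq, seq[1:]))
--     return diffs == list(range(1, len(seq)))
-- ===== Notes on version B (the rewrite author's own statement) =====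
-- stated objective: simpler
-- what changed: Replaced the guarded index loop that collects in-range differences into a set and counts it by a pairwise zip over the sequence and its tail, sorting the absolute differences and comparing positionally against list(range(1, n)).
import Mathlib
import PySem

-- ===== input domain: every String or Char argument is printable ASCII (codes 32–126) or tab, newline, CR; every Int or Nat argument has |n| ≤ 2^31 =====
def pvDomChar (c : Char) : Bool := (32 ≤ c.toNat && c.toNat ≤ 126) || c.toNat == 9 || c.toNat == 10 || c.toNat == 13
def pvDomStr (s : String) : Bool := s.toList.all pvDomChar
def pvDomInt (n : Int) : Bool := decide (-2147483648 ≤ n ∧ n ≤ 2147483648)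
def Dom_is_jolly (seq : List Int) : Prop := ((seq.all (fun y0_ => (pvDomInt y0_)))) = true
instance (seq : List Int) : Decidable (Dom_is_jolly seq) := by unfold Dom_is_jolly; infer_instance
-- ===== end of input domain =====

-- B replaces A's guarded index loop over range(n-1) collecting in-range differences in a set
-- by zipping the sequence with its tail, sorting the absolute differences and comparing them
-- positionally with [1, …, n-1] (simpler, not faster).

-- ===== PORT A =====
def is_jolly (seq : List Int) : Bool :=
  let n : Int := seq.length
  if n ≤ 1 then true
  else
    let seen : PySem.Set Int :=
      (PySem.List.pyRange 0 (n - 1) 1).foldl (fun seen i =>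
        let d : Int := |PySem.List.pyGetD seq i 0 - PySem.List.pyGetD seq (i + 1) 0|
        if 1 ≤ d ∧ d ≤ n - 1 then PySem.Set.add seen d else seen) PySem.Set.empty
    decide (PySem.Set.len seen = n - 1)

-- ===== PORT B =====
def is_jolly_alt (seq : List Int) : Bool :=
  let diffs : List Int :=
    PySem.List.sorted
      ((seq.zip (PySem.List.slice seq (some 1) none)).map (fun p => |p.1 - p.2|))
      (fun x => x)
  decide (diffs = PySem.List.pyRange 1 (seq.length : Int) 1)

-- ===== PRECONDITION & SPEC =====
def Spec_is_jolly (seq : List Int) (out : Bool) : Prop := out = is_jolly_alt seq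
instance (seq : List Int) (out : Bool) : Decidable (Spec_is_jolly seq out) := by unfold Spec_is_jolly; infer_instance

-- ===== CLAIM (what is proved, stated in full; the proofs are below) =====
def Claim_equal_is_jolly : Prop := ∀ (seq : List Int), Dom_is_jolly seq → Spec_is_jolly seq (is_jolly seq)

-- ===== LEMMAS AND PROOFS =====

-- A's loop (add d to the set when the condition holds) is Set.update with the filtered mapped list.
lemma foldl_ite_add (f : Int → Int) (c : Int → Prop) [DecidablePred c] :
    ∀ (l : List Int) (s : PySem.Set Int),
      l.foldl (fun s i => if c (f i) then PySem.Set.add s (f i) else s) s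
        = PySem.Set.update s ((l.map f).filter (fun d => decide (c d))) := by
  intro l
  induction l with
  | nil => intro s; simp [PySem.Set.update_nil]
  | cons i l ih =>
    intro s
    simp only [List.foldl_cons, List.map_cons, List.filter_cons]
    by_cases h : c (f i)
    · simp [h, PySem.Set.update_cons, ih]
    · simp [h, ih]

-- If set(xs) has as many elements as xs, xs had no duplicates.
lemma nodup_of_ofList_length (xs : List Int)
    (h : (PySem.Set.ofList xs).length = xs.length) : xs.Nodup := by
  induction xs with
  | nil => simp
  | cons x xs ih =>
    rw [PySem.Set.ofList_cons] at h
    simp only [List.length_cons] at h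
    have hdis : (PySem.Set.discard (PySem.Set.ofList xs) x).length ≤ (PySem.Set.ofList xs).length :=
      List.length_filter_le _ _
    have hle : (PySem.Set.ofList xs).length ≤ xs.length := PySem.Set.length_ofList_le xs
    have heq : (PySem.Set.discard (PySem.Set.ofList xs) x).length = (PySem.Set.ofList xs).length := by
      omega
    have hfull : PySem.Set.discard (PySem.Set.ofList xs) x = PySem.Set.ofList xs :=
      List.filter_sublist.eq_of_length heq
    have hx : x ∉ xs := by
      intro hmem
      have hx' : x ∈ PySem.Set.ofList xs := (PySem.Set.mem_ofList xs x).2 hmem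
      have := hfull ▸ hx'
      have : x ∈ PySem.Set.discard (PySem.Set.ofList xs) x := this
      rw [PySem.Set.mem_discard] at this
      exact this.2 rfl
    have hxs : xs.Nodup := ih (by omega)
    exact List.nodup_cons.2 ⟨hx, hxs⟩

-- The index-loop differences of A are the zip-with-tail differences of B.
lemma map_range_eq_map_zip (seq : List Int) :
    (PySem.List.pyRange 0 ((seq.length : Int) - 1) 1).map
        (fun i => |PySem.List.pyGetD seq i 0 - PySem.List.pyGetD seq (i + 1) 0|)
      = (seq.zip seq.tail).map (fun p => |p.1 - p.2|) := by
  apply List.ext_getElem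
  · simp [PySem.List.length_pyRange_one, List.length_zip]
  · intro k h1 h2
    have hk : k < seq.length - 1 := by
      simp [List.length_zip] at h2
      omega
    simp only [List.getElem_map, List.getElem_zip,
      PySem.List.getElem_pyRange_one, List.getElem_tail, zero_add]
    rw [PySem.List.pyGetD_eq_getElem seq 0 (by omega) (by omega),
        PySem.List.pyGetD_eq_getElem seq 0 (by omega) (by omega)]
    simp

-- The heart: "n-1 distinct in-range differences" iff "sorted differences = [1, …, n-1]".
lemma key_iff (N : Nat) (ds : List Int) (hN : 1 ≤ N) (hlen : ds.length = N - 1) :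
    (PySem.Set.ofList (ds.filter (fun d => decide (1 ≤ d ∧ d ≤ (N : Int) - 1)))).length = N - 1
      ↔ PySem.List.sorted ds (fun x => x) = PySem.List.pyRange 1 (N : Int) 1 := by
  set c : Int → Bool := fun d => decide (1 ≤ d ∧ d ≤ (N : Int) - 1) with hc
  have hRlen : (PySem.List.pyRange 1 (N : Int) 1).length = N - 1 := by
    rw [PySem.List.length_pyRange_one]; omega
  have hRnodup : (PySem.List.pyRange 1 (N : Int) 1).Nodup := PySem.List.nodup_pyRange_one 1 (N : Int)
  have hmemR : ∀ x : Int, x ∈ PySem.List.pyRange 1 (N : Int) 1 ↔ 1 ≤ x ∧ x < N :=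
    fun x => PySem.List.mem_pyRange_one
  constructor
  · intro h
    have hFle : (ds.filter c).length ≤ ds.length := List.length_filter_le _ _
    have hSle : (PySem.Set.ofList (ds.filter c)).length ≤ (ds.filter c).length :=
      PySem.Set.length_ofList_le _
    have hFeq : ds.filter c = ds := List.filter_sublist.eq_of_length (by omega)
    have hall : ∀ a ∈ ds, c a = true := List.filter_eq_self.1 hFeq
    rw [hFeq] at h
    have hnodup : ds.Nodup := nodup_of_ofList_length ds (by omega)
    have hsub : ds ⊆ PySem.List.pyRange 1 (N : Int) 1 := by
      intro a ha
      have := hall a ha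
      rw [hc] at this
      simp only [decide_eq_true_eq] at this
      exact (hmemR a).2 ⟨this.1, by omega⟩
    have hsp : ds.Subperm (PySem.List.pyRange 1 (N : Int) 1) := hnodup.subperm hsub
    have hperm : ds.Perm (PySem.List.pyRange 1 (N : Int) 1) :=
      hsp.perm_of_length_le (by omega)
    exact PySem.List.sorted_eq_of_perm_of_pairwise_lt ds _ (fun x => x) hperm.symm
      (PySem.List.pairwise_lt_pyRange_one 1 (N : Int))
  · intro h
    have hperm : ds.Perm (PySem.List.pyRange 1 (N : Int) 1) :=
      h ▸ (PySem.List.sorted_perm ds (fun x => x) false).symm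
    have hnodup : ds.Nodup := hperm.nodup_iff.2 hRnodup
    have hall : ∀ a ∈ ds, c a = true := by
      intro a ha
      have := (hmemR a).1 (hperm.subset ha)
      rw [hc]
      simp only [decide_eq_true_eq]
      exact ⟨this.1, by omega⟩
    rw [List.filter_eq_self.2 hall, PySem.Set.ofList_eq_self_of_nodup ds hnodup]
    exact hperm.length_eq.trans hRlen

-- ===== VERDICT (by name: the statement is the Claim_ definition above) =====
theorem is_jolly_spec : Claim_equal_is_jolly := by
  intro seq _
  unfold Spec_is_jolly is_jolly is_jolly_alt
  rw [PySem.List.slice_from_one]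
  set N : Nat := seq.length with hNdef
  set ds : List Int := (seq.zip seq.tail).map (fun p => |p.1 - p.2|) with hds
  have hlen : ds.length = N - 1 := by
    rw [hds]; simp [List.length_zip]; omega
  by_cases h1 : (N : Int) ≤ 1
  · have hr2 : PySem.List.pyRange 1 (N : Int) 1 = [] :=
      PySem.List.pyRange_one_eq_nil (by omega)
    have hds0 : ds = [] := List.eq_nil_of_length_eq_zero (by omega)
    simp [h1, hr2, hds0, PySem.List.sorted]
  · have hN : 2 ≤ N := by omega
    simp only [if_neg h1]
    have hfold := foldl_ite_add
      (fun i => |PySem.List.pyGetD seq i 0 - PySem.List.pyGetD seq (i + 1) 0|)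
      (fun d => 1 ≤ d ∧ d ≤ (N : Int) - 1)
      (PySem.List.pyRange 0 ((N : Int) - 1) 1) PySem.Set.empty
    rw [hfold, PySem.Set.update_empty, map_range_eq_map_zip seq, ← hds]
    have hiff := key_iff N ds (by omega) hlen
    rw [decide_eq_decide, PySem.Set.len]
    constructor
    · intro hint
      exact hiff.1 (by omega)
    · intro hsorted
      have := hiff.2 hsorted
      omega
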